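-- pv_equiv track=rewrite | github.com/rickyurvinauc/IIC1103_TAV_2025 | ayudantias/ayudantia2/P14-c-strings-palabras-equilibradas-C.py | mayor_trozo_completamente_equilibrado
-- ===== SOURCE A (Python) =====
-- def es_vocal(c):
--     # retorna True si c es vocal, False en caso contrario
--     return c in "aeiouAEIOU"
--
-- def mayor_trozo_completamente_equilibrado(palabra):
--     mejor = ""
--     n = len(palabra)
--
--     i = 0
--     while i < n - 1:
--         inicio = i
--
--         # Construir tramo intercalado máximo
--         # mientras los caracteres sean alternadamente vocal y consonante
--         while i + 1 < n and es_vocal(palabra[i]) != es_vocal(palabra[i + 1]):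
--             # avanzar el índice
--             i += 1
--         # Al salir del bucle, i está en el último carácter del tramo
--         fin = i + 1
--         # Obtener el tramo
--         tramo = palabra[inicio:fin]
--
--         # Solo largos pares pueden ser equilibrados porque tienen mitad vocales y mitad consonantes
--         largo = len(tramo)
--         # Verificar si el tramo es equilibrado
--         if largo >= 2:
--             # si es impar, quitar el último carácter para hacerlo par
--             if largo % 2 != 0:
--                 tramo = tramo[:-1]
--             # Verificar si es mejor que el mejor encontrado hasta ahora
--             if len(tramo) > len(mejor):
--                 # Actualizar el mejor tramo encontrado
--                 mejor = tramo
--         # Avanzar al siguiente carácter para iniciar un nuevo tramo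
--         i += 1
--
--     return mejor
-- ===== SOURCE B (Python) =====
-- def es_vocal(c):
--     # retorna True si c es vocal, False en caso contrario
--     return c in "aeiouAEIOU"
--
-- def mayor_trozo_completamente_equilibrado(palabra):
--     n = len(palabra)
--     # Phase 1: every break position i (same vowel-class as its successor) ends a
--     # maximal alternating segment; the segment boundaries tile the word.
--     cortes = [i + 1 for i in range(n - 1)
--               if es_vocal(palabra[i]) == es_vocal(palabra[i + 1])]
--     bordes = [0] + cortes + [n]
--     # Phase 2: reduce over the segments, keeping the earliest longest even-trimmed one.
--     mejor_ini, mejor_len = 0, 0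
--     for s, e in zip(bordes, bordes[1:]):
--         L = (e - s) - (e - s) % 2
--         if L > mejor_len:
--             mejor_ini, mejor_len = s, L
--     return palabra[mejor_ini:mejor_ini + mejor_len]
-- ===== Notes on version B (the rewrite author's own statement) =====
-- stated objective: alternative
-- what changed: Replaces A's fused nested while-loops (inner scan extends a segment while the outer loop updates the best substring on the fly) by a two-phase split-then-reduce: a comprehension first lists every break position, tiling the word into maximal alternating segments, then a single fold over consecutive boundary pairs keeps the earliest longest even-trimmed segment and slices it out once at the end.
import Mathlib
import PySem

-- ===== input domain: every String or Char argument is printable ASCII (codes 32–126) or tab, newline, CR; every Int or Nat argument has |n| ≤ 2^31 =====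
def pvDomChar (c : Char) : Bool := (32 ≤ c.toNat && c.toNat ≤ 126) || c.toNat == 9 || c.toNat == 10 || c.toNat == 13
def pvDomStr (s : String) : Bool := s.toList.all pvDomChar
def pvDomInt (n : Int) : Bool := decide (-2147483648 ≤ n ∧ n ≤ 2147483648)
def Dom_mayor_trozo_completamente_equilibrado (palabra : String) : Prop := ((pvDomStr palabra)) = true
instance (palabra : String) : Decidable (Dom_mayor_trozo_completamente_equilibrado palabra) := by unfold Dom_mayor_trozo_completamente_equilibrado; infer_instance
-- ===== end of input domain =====

-- B replaces A's fused nested while-loops by a two-phase split (break positions → segment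
-- boundaries) then reduce (best even-trimmed segment); same O(n) cost, alternative decomposition.

-- ===== PORT A =====
-- es_vocal(c): 'c in "aeiouAEIOU"' — membership of the one-character string
def es_vocal (c : Char) : Bool := PySem.Chars.isIn [c] ("aeiouAEIOU".toList)

-- A's inner while loop: advance i while the adjacent pair alternates; returns the final i.
-- The loop counter i is a nonnegative Python int, kept as Nat (it only ever grows by 1).
def pvInnerA (cs : List Char) (i : Nat) : Nat :=
  if h : i + 1 < cs.length ∧
      es_vocal (PySem.List.pyGetD cs (i : Int) ' ') ≠ es_vocal (PySem.List.pyGetD cs ((i : Int) + 1) ' ') then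
    pvInnerA cs (i + 1)
  else i
termination_by cs.length - i
decreasing_by omega

-- cited by pvOuterA's decreasing_by
theorem le_pvInnerA (cs : List Char) (i : Nat) : i ≤ pvInnerA cs i := by
  fun_induction pvInnerA with
  | case1 i h ih => omega
  | case2 i h => omega

-- A's outer while loop; mejor is the running best substring.
def pvOuterA (cs : List Char) (i : Nat) (mejor : List Char) : List Char :=
  if hc : i < cs.length - 1 then
    let inicio := i
    let j := pvInnerA cs i
    let fin := j + 1
    let tramo := PySem.List.slice cs (some (inicio : Int)) (some (fin : Int))
    let largo := tramo.length
    if largo ≥ 2 then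
      let tramo2 := if largo % 2 ≠ 0 then PySem.List.slice tramo none (some (-1)) else tramo
      let mejor' := if tramo2.length > mejor.length then tramo2 else mejor
      pvOuterA cs (j + 1) mejor'
    else
      pvOuterA cs (j + 1) mejor
  else mejor
termination_by cs.length - i
decreasing_by
  · have := le_pvInnerA cs i; omega
  · have := le_pvInnerA cs i; omega

def mayor_trozo_completamente_equilibrado (palabra : String) : String :=
  String.ofList (pvOuterA palabra.toList 0 [])

-- ===== PORT B =====
def mayor_trozo_completamente_equilibrado_alt (palabra : String) : String :=
  let cs := palabra.toList
  let n : Int := PySem.Str.len palabra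
  let cortes := ((PySem.List.pyRange 0 (n - 1) 1).filter (fun i =>
      es_vocal (PySem.List.pyGetD cs i ' ') == es_vocal (PySem.List.pyGetD cs (i + 1) ' '))).map (fun i => i + 1)
  let bordes := 0 :: (cortes ++ [n])
  let r := (bordes.zip bordes.tail).foldl
      (fun (st : Int × Int) (p : Int × Int) =>
        let L := (p.2 - p.1) - PySem.Int.mod (p.2 - p.1) 2
        if L > st.2 then (p.1, L) else st)
      (0, 0)
  String.ofList (PySem.List.slice cs (some r.1) (some (r.1 + r.2)))

-- ===== PRECONDITION & SPEC =====
def Spec_mayor_trozo_completamente_equilibrado (palabra : String) (out : String) : Prop := out = mayor_trozo_completamente_equilibrado_alt palabra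
instance (palabra : String) (out : String) : Decidable (Spec_mayor_trozo_completamente_equilibrado palabra out) := by unfold Spec_mayor_trozo_completamente_equilibrado; infer_instance

-- ===== CLAIM (what is proved, stated in full; the proofs are below) =====
def Claim_equal_mayor_trozo_completamente_equilibrado : Prop := ∀ (palabra : String), Dom_mayor_trozo_completamente_equilibrado palabra → Spec_mayor_trozo_completamente_equilibrado palabra (mayor_trozo_completamente_equilibrado palabra)

-- ===== LEMMAS AND PROOFS =====

-- Nat-level mirrors of B's two phases, used only by the proofs.
def pvBrk (cs : List Char) (i : Nat) : Bool :=
  es_vocal (cs.getD i ' ') == es_vocal (cs.getD (i + 1) ' ')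

def pvCuts (cs : List Char) (s : Nat) : List Nat :=
  ((List.range' s (cs.length - 1 - s)).filter (pvBrk cs)).map (· + 1)

def pvPairs (cs : List Char) (s : Nat) : List (Nat × Nat) :=
  (s :: (pvCuts cs s ++ [cs.length])).zip ((s :: (pvCuts cs s ++ [cs.length])).tail)

def pvStep (st : Nat × Nat) (p : Nat × Nat) : Nat × Nat :=
  if (p.2 - p.1) - (p.2 - p.1) % 2 > st.2 then (p.1, (p.2 - p.1) - (p.2 - p.1) % 2) else st

theorem dropLast_take_of_le {α : Type} (l : List α) (m : Nat) (h : m ≤ l.length) :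
    (l.take m).dropLast = l.take (m - 1) := by
  rcases Nat.lt_or_ge m l.length with h' | h'
  · exact List.dropLast_take h'
  · have hm : m = l.length := le_antisymm h h'
    subst hm
    rw [List.take_length, List.dropLast_eq_take]

theorem pvInnerA_lt (cs : List Char) (i : Nat) (h : i < cs.length) : pvInnerA cs i < cs.length := by
  fun_induction pvInnerA with
  | case1 i h2 ih => exact ih (by omega)
  | case2 i h2 => omega

theorem pyGetD_cast_succ (cs : List Char) (i : Nat) (d : Char) :
    PySem.List.pyGetD cs ((i : Int) + 1) d = cs.getD (i + 1) d := by
  rw [show ((i : Int) + 1) = (((i + 1 : Nat)) : Int) by push_cast; ring, PySem.List.pyGetD_natCast]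

theorem cuts_eq (cs : List Char) (s : Nat) :
    pvCuts cs s = if pvInnerA cs s + 1 < cs.length
      then (pvInnerA cs s + 1) :: pvCuts cs (pvInnerA cs s + 1) else [] := by
  fun_induction pvInnerA cs s with
  | case1 i h ih =>
    rw [← ih]
    unfold pvCuts
    have hlen : cs.length - 1 - i = (cs.length - 1 - (i+1)) + 1 := by omega
    rw [hlen, List.range'_succ]
    have h2 := h.2
    rw [PySem.List.pyGetD_natCast, pyGetD_cast_succ] at h2
    have hb : pvBrk cs i = false := by unfold pvBrk; exact beq_eq_false_iff_ne.mpr h2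
    simp [hb]
  | case2 i h =>
    by_cases hi : i + 1 < cs.length
    · have h2 := not_and.mp h hi
      rw [PySem.List.pyGetD_natCast, pyGetD_cast_succ] at h2
      have he := not_not.mp h2
      have hb : pvBrk cs i = true := by unfold pvBrk; exact beq_iff_eq.mpr he
      simp only [hi, if_true]
      unfold pvCuts
      have hlen : cs.length - 1 - i = (cs.length - 1 - (i+1)) + 1 := by omega
      rw [hlen, List.range'_succ]
      simp [hb]
    · simp only [hi, if_false]
      unfold pvCuts
      have : cs.length - 1 - i = 0 := by omega
      simp [this]

theorem step_case (cs : List Char) (s j b1 b2 : Nat) (hsj : s ≤ j) (hjl : j + 1 ≤ cs.length)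
    (hb : b1 + b2 ≤ cs.length) :
    ((if ((cs.drop s).take (j + 1 - s)).length ≥ 2 then
        (if (if ((cs.drop s).take (j + 1 - s)).length % 2 ≠ 0
              then ((cs.drop s).take (j + 1 - s)).dropLast
              else (cs.drop s).take (j + 1 - s)).length > ((cs.drop b1).take b2).length
          then (if ((cs.drop s).take (j + 1 - s)).length % 2 ≠ 0
              then ((cs.drop s).take (j + 1 - s)).dropLast
              else (cs.drop s).take (j + 1 - s))
          else (cs.drop b1).take b2)
      else (cs.drop b1).take b2)
     = (cs.drop (pvStep (b1, b2) (s, j + 1)).1).take (pvStep (b1, b2) (s, j + 1)).2)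
    ∧ (pvStep (b1, b2) (s, j + 1)).1 + (pvStep (b1, b2) (s, j + 1)).2 ≤ cs.length := by
  have hlen : ((cs.drop s).take (j + 1 - s)).length = j + 1 - s := by
    simp [List.length_take, List.length_drop]; omega
  have hblen : ((cs.drop b1).take b2).length = b2 := by
    simp [List.length_take, List.length_drop]; omega
  have hdl : ((cs.drop s).take (j + 1 - s)).dropLast = (cs.drop s).take (j + 1 - s - 1) := by
    apply dropLast_take_of_le; simp [List.length_drop]; omega
  have hdlen : ((cs.drop s).take (j + 1 - s - 1)).length = j + 1 - s - 1 := by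
    simp [List.length_take, List.length_drop]; omega
  constructor
  · rw [hdl, apply_ite List.length, hdlen, hlen, hblen]
    simp only [pvStep]
    split_ifs <;> first | rfl | (exfalso; omega) | (congr 1; omega)
  · simp only [pvStep]
    split_ifs <;> (simp; omega)

theorem outer_eq (cs : List Char) (m : Nat) : ∀ s b1 b2, cs.length - s ≤ m →
    s ≤ cs.length → b1 + b2 ≤ cs.length →
    pvOuterA cs s ((cs.drop b1).take b2) =
      (fun r : Nat × Nat => (cs.drop r.1).take r.2) (List.foldl pvStep (b1, b2) (pvPairs cs s)) := by
  induction m with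
  | zero =>
    intro s b1 b2 hm hs hb
    rw [pvOuterA, dif_neg (by omega)]
    have hcuts : pvCuts cs s = [] := by unfold pvCuts; simp [show cs.length - 1 - s = 0 by omega]
    simp [pvPairs, hcuts, pvStep, show cs.length - s = 0 by omega]
  | succ m ih =>
    intro s b1 b2 hm hs hb
    by_cases hc : s < cs.length - 1
    · have hj_ge := le_pvInnerA cs s
      have hj_lt := pvInnerA_lt cs s (by omega)
      rw [pvOuterA, dif_pos hc]
      dsimp only
      rw [PySem.List.slice_natCast, PySem.List.slice_to_neg_one]
      have hsc := step_case cs s (pvInnerA cs s) b1 b2 hj_ge (by omega) hb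
      by_cases hjn : pvInnerA cs s + 1 < cs.length
      · have hpairs : pvPairs cs s = (s, pvInnerA cs s + 1) :: pvPairs cs (pvInnerA cs s + 1) := by
          unfold pvPairs
          rw [cuts_eq, if_pos hjn]
          simp
        rw [hpairs, List.foldl_cons]
        have hrec := ih (pvInnerA cs s + 1) (pvStep (b1, b2) (s, pvInnerA cs s + 1)).1
          (pvStep (b1, b2) (s, pvInnerA cs s + 1)).2 (by omega) (by omega) hsc.2
        by_cases h2 : ((cs.drop s).take (pvInnerA cs s + 1 - s)).length ≥ 2
        · rw [if_pos h2]
          rw [if_pos h2] at hsc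
          by_cases hodd : ((cs.drop s).take (pvInnerA cs s + 1 - s)).length % 2 ≠ 0
          · rw [if_pos hodd]
            rw [if_pos hodd] at hsc
            by_cases hgt : (((cs.drop s).take (pvInnerA cs s + 1 - s)).dropLast).length > ((cs.drop b1).take b2).length
            · rw [if_pos hgt]; rw [if_pos hgt] at hsc; rw [hsc.1, hrec]
            · rw [if_neg hgt]; rw [if_neg hgt] at hsc; rw [hsc.1, hrec]
          · rw [if_neg hodd]
            rw [if_neg hodd] at hsc
            by_cases hgt : ((cs.drop s).take (pvInnerA cs s + 1 - s)).length > ((cs.drop b1).take b2).length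
            · rw [if_pos hgt]; rw [if_pos hgt] at hsc; rw [hsc.1, hrec]
            · rw [if_neg hgt]; rw [if_neg hgt] at hsc; rw [hsc.1, hrec]
        · rw [if_neg h2]
          rw [if_neg h2] at hsc
          rw [hsc.1, hrec]
      · have hj1 : pvInnerA cs s + 1 = cs.length := by omega
        have hpairs : pvPairs cs s = [(s, pvInnerA cs s + 1)] := by
          unfold pvPairs; rw [cuts_eq, if_neg hjn]; simp [hj1]
        have hrec : ∀ mj : List Char, pvOuterA cs (pvInnerA cs s + 1) mj = mj := by
          intro mj; rw [pvOuterA, dif_neg (by omega)]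
        rw [hpairs, List.foldl_cons, List.foldl_nil]
        simp only [hrec]
        exact hsc.1
    · rw [pvOuterA, dif_neg hc]
      have hcuts : pvCuts cs s = [] := by unfold pvCuts; simp [show cs.length - 1 - s = 0 by omega]
      simp [pvPairs, hcuts, pvStep, show cs.length - s - (cs.length - s) % 2 = 0 by omega]

theorem pairs_le (cs : List Char) (m : Nat) : ∀ s, cs.length - s ≤ m → s ≤ cs.length →
    ∀ p ∈ pvPairs cs s, p.1 ≤ p.2 := by
  induction m with
  | zero =>
    intro s hm hs p hp
    have hcuts : pvCuts cs s = [] := by unfold pvCuts; simp [show cs.length - 1 - s = 0 by omega]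
    have hpairs : pvPairs cs s = [(s, cs.length)] := by unfold pvPairs; rw [hcuts]; simp
    rw [hpairs, List.mem_singleton] at hp
    subst hp
    simpa using hs
  | succ m ih =>
    intro s hm hs p hp
    by_cases hjn : pvInnerA cs s + 1 < cs.length
    · have hj_ge := le_pvInnerA cs s
      have hpairs : pvPairs cs s = (s, pvInnerA cs s + 1) :: pvPairs cs (pvInnerA cs s + 1) := by
        unfold pvPairs
        rw [cuts_eq, if_pos hjn]
        simp
      rw [hpairs] at hp
      rcases List.mem_cons.mp hp with h | h
      · subst h; simp; omega
      · exact ih (pvInnerA cs s + 1) (by omega) (by omega) p h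
    · have hpairs : pvPairs cs s = [(s, cs.length)] := by
        unfold pvPairs
        rw [cuts_eq, if_neg hjn]
        simp
      rw [hpairs, List.mem_singleton] at hp
      subst hp
      simpa using hs

theorem fold_cast (l : List (Nat × Nat)) (a b : Nat) (hl : ∀ p ∈ l, p.1 ≤ p.2) :
    List.foldl
      (fun (st : Int × Int) (p : Int × Int) =>
        let L := (p.2 - p.1) - PySem.Int.mod (p.2 - p.1) 2
        if L > st.2 then (p.1, L) else st)
      ((a : Int), (b : Int)) (l.map (fun p : Nat × Nat => ((p.1 : Int), (p.2 : Int)))) =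
    (fun r : Nat × Nat => ((r.1 : Int), (r.2 : Int))) (List.foldl pvStep (a, b) l) := by
  induction l generalizing a b with
  | nil => rfl
  | cons p l ih =>
    have hp : p.1 ≤ p.2 := hl p (by simp)
    have hrest : ∀ q ∈ l, q.1 ≤ q.2 := fun q hq => hl q (by simp [hq])
    simp only [List.map_cons, List.foldl_cons]
    have hL : ((p.2 : Int) - (p.1 : Int)) - PySem.Int.mod ((p.2 : Int) - (p.1 : Int)) 2
        = (((p.2 - p.1) - (p.2 - p.1) % 2 : Nat) : Int) := by
      rw [show ((p.2 : Int) - (p.1 : Int)) = (((p.2 - p.1 : Nat)) : Int) by push_cast [hp]; ring]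
      rw [show (2 : Int) = ((2 : Nat) : Int) from rfl, PySem.Int.mod_natCast]
      rw [Nat.cast_sub (Nat.mod_le _ _)]
    rw [hL]
    by_cases hgt : (p.2 - p.1) - (p.2 - p.1) % 2 > b
    · rw [if_pos (by exact_mod_cast hgt), show pvStep (a, b) p = (p.1, (p.2 - p.1) - (p.2 - p.1) % 2) by simp [pvStep, hgt]]
      exact ih _ _ hrest
    · rw [if_neg (by exact_mod_cast hgt), show pvStep (a, b) p = (a, b) by simp [pvStep]; omega]
      exact ih _ _ hrest

theorem alt_eq (palabra : String) :
    mayor_trozo_completamente_equilibrado_alt palabra =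
      String.ofList ((fun r : Nat × Nat => ((palabra.toList.drop r.1).take r.2))
        (List.foldl pvStep (0, 0) (pvPairs palabra.toList 0))) := by
  unfold mayor_trozo_completamente_equilibrado_alt
  dsimp only
  rw [PySem.Str.len_eq]
  have hrange : PySem.List.pyRange 0 ((palabra.toList.length : Int) - 1) 1
      = (List.range (palabra.toList.length - 1)).map (fun k : Nat => (k : Int)) := by
    rcases Nat.eq_zero_or_pos palabra.toList.length with h0 | h0
    · rw [h0]
      rw [PySem.List.pyRange_one_eq_nil (by omega)]
      simp
    · rw [show ((palabra.toList.length : Int) - 1) = ((palabra.toList.length - 1 : Nat) : Int) by push_cast [h0]; ring]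
      exact PySem.List.pyRange_zero_natCast _
  rw [hrange, List.filter_map]
  rw [List.filter_congr (q := pvBrk palabra.toList) (by
    intro x hx
    simp only [Function.comp]
    rw [PySem.List.pyGetD_natCast, pyGetD_cast_succ]
    rfl)]
  rw [List.map_map]
  rw [show ((fun i : Int => i + 1) ∘ fun k : Nat => (k : Int)) = ((fun k : Nat => (k : Int)) ∘ (fun k : Nat => k + 1)) by
    funext k; simp]
  rw [← List.map_map]
  have hcuts : ((List.range (palabra.toList.length - 1)).filter (pvBrk palabra.toList)).map (fun k => k + 1)
      = pvCuts palabra.toList 0 := by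
    unfold pvCuts
    rw [List.range_eq_range']
    simp
  rw [hcuts]
  have hb : (0 : Int) :: ((pvCuts palabra.toList 0).map (fun k : Nat => (k : Int)) ++ [(palabra.toList.length : Int)])
      = (0 :: (pvCuts palabra.toList 0 ++ [palabra.toList.length])).map (fun k : Nat => (k : Int)) := by
    simp
  rw [hb, ← List.map_tail, List.zip_map]
  have hzip : ((0 :: (pvCuts palabra.toList 0 ++ [palabra.toList.length])).zip
        (0 :: (pvCuts palabra.toList 0 ++ [palabra.toList.length])).tail).map
        (Prod.map (fun k : Nat => (k : Int)) (fun k : Nat => (k : Int)))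
      = (pvPairs palabra.toList 0).map (fun p : Nat × Nat => ((p.1 : Int), (p.2 : Int))) := by
    unfold pvPairs
    apply List.map_congr_left
    intro p _
    rfl
  rw [hzip]
  rw [show ((0 : Int), (0 : Int)) = (((0 : Nat) : Int), ((0 : Nat) : Int)) by norm_num]
  rw [fold_cast _ _ _ (pairs_le palabra.toList palabra.toList.length 0 (by omega) (by omega))]
  dsimp only
  rw [show ((List.foldl pvStep (0, 0) (pvPairs palabra.toList 0)).1 : Int)
      + ((List.foldl pvStep (0, 0) (pvPairs palabra.toList 0)).2 : Int)
      = (((List.foldl pvStep (0, 0) (pvPairs palabra.toList 0)).1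
        + (List.foldl pvStep (0, 0) (pvPairs palabra.toList 0)).2 : Nat) : Int) by push_cast; ring]
  rw [PySem.List.slice_natCast, Nat.add_sub_cancel_left]

-- ===== VERDICT (by name: the statement is the Claim_ definition above) =====
theorem mayor_trozo_completamente_equilibrado_spec : Claim_equal_mayor_trozo_completamente_equilibrado := by
  intro palabra _
  unfold Spec_mayor_trozo_completamente_equilibrado
  rw [alt_eq]
  unfold mayor_trozo_completamente_equilibrado
  have h := outer_eq palabra.toList palabra.toList.length 0 0 0 (by omega) (by omega) (by omega)
  simpa using congrArg String.ofList h
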